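-- pv_equiv track=rewrite | github.com/joyceeexinyiwang/CampusCampaignTartanhacks | ccm/viewsEDIT.py | findParticipant
-- ===== SOURCE A (Python) =====
-- def findParticipant(goalDict):
--     result = {}
--     for goal in goalDict:
--         participants = goalDict[goal]
--         for participant in participants:
--             if participant not in result:
--                 result[participant] = list()
--             if goal not in result[participant]:
--                 result[participant].append(goal)
--     return result
-- ===== SOURCE B (Python) =====
-- def findParticipant(goalDict):
--     # gather: first collect participants in first-encounter order, then
--     # re-scan the goals once per participant to collect its goal list
--     order = dict.fromkeys(p for ps in goalDict.values() for p in ps)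
--     items = [(g, set(ps)) for g, ps in goalDict.items()]
--     return {p: [g for g, ps in items if p in ps] for p in order}
-- ===== Notes on version B (the rewrite author's own statement) =====
-- stated objective: alternative
-- what changed: Replaces A's single scatter pass that incrementally builds and appends to per-participant lists with a gather strategy: dedup all participants first, then re-scan the goal dict (with precomputed participant sets) once per participant to collect its goals.
import Mathlib
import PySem

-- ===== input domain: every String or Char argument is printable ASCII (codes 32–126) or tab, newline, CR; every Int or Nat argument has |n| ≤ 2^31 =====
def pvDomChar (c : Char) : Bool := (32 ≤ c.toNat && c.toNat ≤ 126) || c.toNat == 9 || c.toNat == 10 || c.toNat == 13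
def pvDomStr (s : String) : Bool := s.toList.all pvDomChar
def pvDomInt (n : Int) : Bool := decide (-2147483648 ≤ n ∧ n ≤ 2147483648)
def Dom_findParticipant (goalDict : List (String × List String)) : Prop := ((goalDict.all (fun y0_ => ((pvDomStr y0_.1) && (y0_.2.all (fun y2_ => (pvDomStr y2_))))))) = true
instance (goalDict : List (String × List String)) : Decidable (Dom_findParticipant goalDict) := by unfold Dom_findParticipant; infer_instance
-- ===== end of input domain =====

-- B replaces A's single scatter pass (incrementally building per-participant lists)
-- with a gather pass: dedup all participants first, then re-scan the goals per participant (objective: alternative decomposition, not faster).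


-- ===== PORT A =====
-- body of A's inner loop: one participant of the current goal
def pvStepA (goal : String) (result : PySem.Dict String (List String)) (participant : String) :
    PySem.Dict String (List String) :=
  let result := if result.contains participant then result else result.insert participant []
  if (result.getD participant []).contains goal then result
  else result.modify participant [] (fun l => l ++ [goal])

def findParticipant (goalDict : List (String × List String)) : List (String × List String) :=
  (goalDict.foldl
    (fun result gp =>
      ((PySem.Dict.mk goalDict).getD gp.1 []).foldl (pvStepA gp.1) result)
    PySem.Dict.empty).items

-- ===== PORT B =====
def findParticipant_alt (goalDict : List (String × List String)) : List (String × List String) :=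
  let items := goalDict.map (fun gp => (gp.1, PySem.Set.ofList gp.2))
  (PySem.List.dedup (goalDict.flatMap (fun gp => gp.2))).map
    (fun p => (p, (items.filter (fun gp => gp.2.contains p)).map (fun gp => gp.1)))

-- ===== PRECONDITION & SPEC =====
-- The association list stands for a Python dict, whose keys are necessarily distinct:
-- A (as Python) can never receive duplicate goal keys, so Pre_ excludes no input the Python A accepts.
def Pre_findParticipant (goalDict : List (String × List String)) : Prop :=
  (goalDict.map (fun gp => gp.1)).Nodup
instance (goalDict : List (String × List String)) : Decidable (Pre_findParticipant goalDict) := by unfold Pre_findParticipant; infer_instance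
def pvWitness_findParticipant : (List (String × List String)) :=
  [("g1", ["a", "b", "a"]), ("g2", ["b"]), ("g3", [])]

def Spec_findParticipant (goalDict : List (String × List String)) (out : List (String × List String)) : Prop := out = findParticipant_alt goalDict
instance (goalDict : List (String × List String)) (out : List (String × List String)) : Decidable (Spec_findParticipant goalDict out) := by unfold Spec_findParticipant; infer_instance

-- ===== CLAIM (what is proved, stated in full; the proofs are below) =====
def Claim_equal_findParticipant : Prop := ∀ (goalDict : List (String × List String)), Dom_findParticipant goalDict → Pre_findParticipant goalDict → Spec_findParticipant goalDict (findParticipant goalDict)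

-- ===== LEMMAS AND PROOFS =====

-- A's outer loop, with each goal's participants taken from the pair itself
def pvFoldA (L : List (String × List String)) (d : PySem.Dict String (List String)) :
    PySem.Dict String (List String) :=
  L.foldl (fun result gp => gp.2.foldl (pvStepA gp.1) result) d

lemma pvStepA_getD_self (g p : String) (d : PySem.Dict String (List String)) :
    (pvStepA g d p).getD p [] = if g ∈ d.getD p [] then d.getD p [] else d.getD p [] ++ [g] := by
  unfold pvStepA
  by_cases hc : d.contains p = true
  · simp only [hc, if_true]
    by_cases hg : g ∈ d.getD p []
    · simp [hg]
    · simp [hg, PySem.Dict.getD_modify_self]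
  · simp only [hc, if_false, Bool.false_eq_true]
    have h0 : d.getD p [] = [] := PySem.Dict.getD_of_not_contains d [] (by simpa using hc)
    simp [h0, PySem.Dict.getD_insert_self, PySem.Dict.getD_modify_self]

lemma pvStepA_getD_ne (g p p0 : String) (d : PySem.Dict String (List String)) (h : p ≠ p0) :
    (pvStepA g d p0).getD p [] = d.getD p [] := by
  unfold pvStepA
  simp only
  split <;> split <;>
    simp [PySem.Dict.getD_modify_of_ne _ _ _ h, PySem.Dict.getD_insert_of_ne _ _ _ h]

lemma pvStepA_keys (g p0 : String) (d : PySem.Dict String (List String)) :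
    (pvStepA g d p0).keys = PySem.Set.add d.keys p0 := by
  unfold pvStepA PySem.Set.add
  by_cases hc : d.contains p0 = true
  · have hsc : PySem.Set.contains d.keys p0 = true := by
      simpa [PySem.Set.contains] using (PySem.Dict.contains_iff_mem_keys d p0).1 hc
    simp only [hc, if_true, hsc]
    split
    · rfl
    · rw [PySem.Dict.keys_modify, PySem.Dict.keys_insert_of_contains _ _ hc]
  · have hmem : ¬ p0 ∈ d.keys := fun hm => hc ((PySem.Dict.contains_iff_mem_keys d p0).2 hm)
    have hsc : PySem.Set.contains d.keys p0 = false := by simp [PySem.Set.contains, hmem]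
    simp only [hc, if_false, Bool.false_eq_true, hsc]
    have hk : (d.insert p0 ([] : List String)).keys = d.keys ++ [p0] :=
      PySem.Dict.keys_insert_of_not_contains d [] (by simpa using hc)
    split
    · exact hk
    · rw [PySem.Dict.keys_modify, PySem.Dict.keys_insert_of_contains _ _ (by simp [PySem.Dict.contains_insert_self]), hk]

lemma pv_inner_getD (g p : String) (ps : List String) (d : PySem.Dict String (List String)) :
    (ps.foldl (pvStepA g) d).getD p [] =
      if p ∈ ps ∧ g ∉ d.getD p [] then d.getD p [] ++ [g] else d.getD p [] := by
  induction ps generalizing d with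
  | nil => simp
  | cons p0 rest ih =>
    rw [List.foldl_cons, ih]
    by_cases hp : p = p0
    · subst hp
      rw [pvStepA_getD_self]
      by_cases hg : g ∈ d.getD p []
      · simp [hg]
      · simp [hg]
    · rw [pvStepA_getD_ne _ _ _ _ hp]
      simp [hp]

lemma pv_inner_keys (g : String) (ps : List String) (d : PySem.Dict String (List String)) :
    (ps.foldl (pvStepA g) d).keys = PySem.Set.update d.keys ps := by
  induction ps generalizing d with
  | nil => rfl
  | cons p0 rest ih =>
    rw [List.foldl_cons, ih, pvStepA_keys, PySem.Set.update_cons]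

lemma pv_outer_keys (L : List (String × List String)) (d : PySem.Dict String (List String)) :
    (pvFoldA L d).keys = PySem.Set.update d.keys (L.flatMap (fun gp => gp.2)) := by
  induction L generalizing d with
  | nil => rfl
  | cons gp rest ih =>
    simp only [pvFoldA, List.foldl_cons, List.flatMap_cons] at *
    rw [ih, pv_inner_keys, PySem.Set.update_append]

lemma pv_outer_getD (p : String) (L : List (String × List String))
    (d : PySem.Dict String (List String))
    (hnd : (L.map (fun gp => gp.1)).Nodup)
    (hfresh : ∀ gp ∈ L, gp.1 ∉ d.getD p []) :
    (pvFoldA L d).getD p [] =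
      d.getD p [] ++ (L.filter (fun gp => gp.2.contains p)).map (fun gp => gp.1) := by
  induction L generalizing d with
  | nil => simp [pvFoldA]
  | cons gp rest ih =>
    simp only [pvFoldA, List.foldl_cons] at *
    have hg : gp.1 ∉ d.getD p [] := hfresh gp (by simp)
    have h1 : (gp.2.foldl (pvStepA gp.1) d).getD p [] =
        if p ∈ gp.2 then d.getD p [] ++ [gp.1] else d.getD p [] := by
      rw [pv_inner_getD]
      by_cases hp : p ∈ gp.2 <;> simp [hp, hg]
    rw [ih _ (by simp only [List.map_cons, List.nodup_cons] at hnd; exact hnd.2)]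
    · rw [h1, List.filter_cons]
      by_cases hp : p ∈ gp.2 <;> simp [hp, List.append_assoc]
    · intro gp' hmem
      rw [h1]
      have hne : gp'.1 ≠ gp.1 := by
        intro he
        have hnd' : gp.1 ∉ rest.map (fun gp => gp.1) := by
          simp only [List.map_cons, List.nodup_cons] at hnd
          exact hnd.1
        exact hnd' (he ▸ (List.mem_map.2 ⟨gp', hmem, rfl⟩))
      have := hfresh gp' (by simp [hmem])
      split <;> simp [this, hne]

-- ===== VERDICT (by name: the statement is the Claim_ definition above) =====
theorem findParticipant_spec : Claim_equal_findParticipant := by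
  intro goalDict _ hpre
  unfold Spec_findParticipant
  have hkm : (PySem.Dict.mk goalDict).keys.Nodup := by
    simpa [PySem.Dict.keys_mk] using hpre
  have hcongr : goalDict.foldl
      (fun result gp => ((PySem.Dict.mk goalDict).getD gp.1 []).foldl (pvStepA gp.1) result)
      PySem.Dict.empty = pvFoldA goalDict PySem.Dict.empty := by
    apply PySem.List.foldl_congr_mem
    intro acc gp hmem
    have : (PySem.Dict.mk goalDict).getD gp.1 [] = gp.2 :=
      PySem.Dict.getD_of_mem_items _ (by exact hmem) hkm []
    rw [this]
  unfold findParticipant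
  rw [hcongr]
  have hkeys : (pvFoldA goalDict PySem.Dict.empty).keys =
      PySem.Set.ofList (goalDict.flatMap (fun gp => gp.2)) := by
    rw [pv_outer_keys, PySem.Dict.keys_empty, PySem.Set.update_nil_left]
  rw [PySem.Dict.items_eq_map_keys _ (by rw [hkeys]; exact PySem.Set.nodup_ofList _) [], hkeys]
  unfold findParticipant_alt
  rw [PySem.List.dedup_eq_ofList]
  apply List.map_congr_left
  intro p hp
  rw [pv_outer_getD p goalDict PySem.Dict.empty hpre (by simp [PySem.Dict.getD_empty])]
  simp only [PySem.Dict.getD_empty, List.nil_append, List.filter_map, List.map_map]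
  rw [List.filter_congr (fun gp _ => by
    simp [Function.comp, PySem.Set.mem_ofList] :
      ∀ gp ∈ goalDict, ((fun gp => gp.2.contains p) ∘ fun gp => (gp.1, PySem.Set.ofList gp.2)) gp
        = (fun gp : String × List String => gp.2.contains p) gp)]
  simp [Function.comp]
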